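-- pv_equiv track=rewrite | github.com/woodaekki/SSAFY | for_test3/fly3.py | pang
-- ===== SOURCE A (Python) =====
-- def pang(n,m,arr):
--     maxv = -9999999999
--     directions = [(0,1),(1,0),(0,-1),(-1,0)]
--     # 가로열
--     for i in range(n):
--         for j in range(n):
--             sumv = arr[i][j]
--             for step in range(1,m):
--                 for di,dj in directions:
--                     ni,nj = i+di*step,j+dj*step
--                     if 0<=ni<n and 0<=nj<n:
--                         sumv += arr[ni][nj]
--                 if sumv > maxv:
--                     maxv = sumv
--
--     maxv2 = -99999999999
--     directions2 = [(1,1),(1,-1),(-1,-1),(-1,1)]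
--     # 대각선열
--     for i in range(n):
--         for j in range(n):
--             sumv2 = arr[i][j]
--             for step2 in range(1,m):
--                 for di,dj in directions2:
--                     ni,nj = i+di*step2,j+dj*step2
--                     if 0<=ni<n and 0<=nj<n:
--                         sumv2 += arr[ni][nj]
--                 if sumv2 > maxv2:
--                     maxv2 = sumv2
--
--     if maxv > maxv2:
--         return maxv
--     else:
--         return maxv2
-- ===== SOURCE B (Python) =====
-- # B: per cell, build the eight boundary-clipped arms once, turn each into a
-- # prefix-sum list, and read every length-L candidate with O(1) lookups; the
-- # length loop is capped at the longest arm (beyond it candidates are constant),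
-- # and the plus- and X-maxima are tracked in one combined sweep over the cells.
--
-- def _cums(r):
--     out = [0]
--     s = 0
--     for v in r:
--         s += v
--         out.append(s)
--     return out
--
-- def pang(n, m, arr):
--     best = -9999999999
--     bestx = -99999999999
--     for i in range(n):
--         for j in range(n):
--             c = arr[i][j]
--             r0 = _cums([arr[i][j + t] for t in range(1, min(m, n - j))])
--             r1 = _cums([arr[i + t][j] for t in range(1, min(m, n - i))])
--             r2 = _cums([arr[i][j - t] for t in range(1, min(m, j + 1))])
--             r3 = _cums([arr[i - t][j] for t in range(1, min(m, i + 1))])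
--             x0 = _cums([arr[i + t][j + t] for t in range(1, min(m, n - i, n - j))])
--             x1 = _cums([arr[i + t][j - t] for t in range(1, min(m, n - i, j + 1))])
--             x2 = _cums([arr[i - t][j - t] for t in range(1, min(m, i + 1, j + 1))])
--             x3 = _cums([arr[i - t][j + t] for t in range(1, min(m, i + 1, n - j))])
--             l0 = len(r0) - 1; l1 = len(r1) - 1; l2 = len(r2) - 1; l3 = len(r3) - 1
--             k0 = len(x0) - 1; k1 = len(x1) - 1; k2 = len(x2) - 1; k3 = len(x3) - 1
--             maxlen = max(l0, l1, l2, l3, k0, k1, k2, k3)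
--             cap = min(m - 1, max(1, maxlen))
--             for L in range(1, cap + 1):
--                 cand = c + r0[min(L, l0)] + r1[min(L, l1)] + r2[min(L, l2)] + r3[min(L, l3)]
--                 if cand > best:
--                     best = cand
--                 candx = c + x0[min(L, k0)] + x1[min(L, k1)] + x2[min(L, k2)] + x3[min(L, k3)]
--                 if candx > bestx:
--                     bestx = candx
--     if best > bestx:
--         return best
--     else:
--         return bestx
-- ===== Notes on version B (the rewrite author's own statement) =====
-- stated objective: alternative
-- what changed: Instead of A's two separate grid passes that re-walk the four directions with bounds checks at every step and grow a running sum, B builds for each cell the eight boundary-clipped arms once, turns each into a prefix-sum list so every length-L candidate is five O(1) lookups, caps the length loop at the longest arm (beyond it candidates are constant), and tracks the plus- and X-maxima in a single combined sweep.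
import Mathlib
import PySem

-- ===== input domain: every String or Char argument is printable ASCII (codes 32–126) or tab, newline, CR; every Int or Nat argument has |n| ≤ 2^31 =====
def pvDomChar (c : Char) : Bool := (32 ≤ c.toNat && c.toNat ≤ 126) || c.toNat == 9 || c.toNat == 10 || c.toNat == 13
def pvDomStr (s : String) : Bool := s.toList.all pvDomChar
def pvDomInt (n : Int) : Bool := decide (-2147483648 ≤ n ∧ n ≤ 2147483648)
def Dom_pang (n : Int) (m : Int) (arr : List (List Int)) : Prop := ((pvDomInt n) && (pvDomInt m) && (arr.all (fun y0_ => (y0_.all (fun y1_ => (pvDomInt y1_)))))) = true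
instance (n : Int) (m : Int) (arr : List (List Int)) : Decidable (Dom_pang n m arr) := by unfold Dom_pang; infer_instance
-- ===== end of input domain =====

-- B replaces A's per-step bounds-checked accumulation by per-cell clipped arms
-- with prefix-sum lookups, a length loop capped at the longest arm, and one
-- combined sweep for the plus- and X-maxima (objective: alternative/faster on
-- large m; equivalence is about the return value, neither mutates arr).

-- ===== PORT A =====
-- arr[i][j] (indices guaranteed in range under Pre_pang)
def pvIdx (arr : List (List Int)) (i j : Int) : Int :=
  PySem.List.pyGetD (PySem.List.pyGetD arr i []) j 0

-- one cell of one of A's two passes: the 'for step in range(1,m)' loop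
def pangPassCell (n m : Int) (arr : List (List Int)) (dirs : List (Int × Int))
    (i j : Int) (maxv : Int) : Int :=
  ((PySem.List.pyRange 1 m 1).foldl
    (fun (st : Int × Int) step =>
      let sumv := dirs.foldl (fun sv d =>
        let ni := i + d.1 * step
        let nj := j + d.2 * step
        if 0 ≤ ni ∧ ni < n ∧ 0 ≤ nj ∧ nj < n then sv + pvIdx arr ni nj else sv) st.1
      (sumv, if sumv > st.2 then sumv else st.2))
    (pvIdx arr i j, maxv)).2

-- one of A's two double loops over the cells
def pangPass (n m : Int) (arr : List (List Int)) (dirs : List (Int × Int)) (init : Int) : Int :=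
  (PySem.List.pyRange 0 n 1).foldl (fun mv i =>
    (PySem.List.pyRange 0 n 1).foldl (fun mv j =>
      pangPassCell n m arr dirs i j mv) mv) init

def pang (n : Int) (m : Int) (arr : List (List Int)) : Int :=
  let maxv := pangPass n m arr [(0,1),(1,0),(0,-1),(-1,0)] (-9999999999)
  let maxv2 := pangPass n m arr [(1,1),(1,-1),(-1,-1),(-1,1)] (-99999999999)
  if maxv > maxv2 then maxv else maxv2

-- ===== PORT B =====
-- _cums: prefix sums with a leading 0
def cums (r : List Int) : List Int :=
  (r.foldl (fun (st : List Int × Int) v => (st.1 ++ [st.2 + v], st.2 + v)) ([0], 0)).1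

-- the body of B's cell loop: eight clipped arms, their prefix sums, and the
-- capped length loop updating the (best, bestx) pair
def bCell (n m : Int) (arr : List (List Int)) (i j : Int) (bp : Int × Int) : Int × Int :=
  let c := pvIdx arr i j
  let r0 := cums ((PySem.List.pyRange 1 (min m (n - j)) 1).map (fun t => pvIdx arr i (j + t)))
  let r1 := cums ((PySem.List.pyRange 1 (min m (n - i)) 1).map (fun t => pvIdx arr (i + t) j))
  let r2 := cums ((PySem.List.pyRange 1 (min m (j + 1)) 1).map (fun t => pvIdx arr i (j - t)))
  let r3 := cums ((PySem.List.pyRange 1 (min m (i + 1)) 1).map (fun t => pvIdx arr (i - t) j))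
  let x0 := cums ((PySem.List.pyRange 1 (min m (min (n - i) (n - j))) 1).map (fun t => pvIdx arr (i + t) (j + t)))
  let x1 := cums ((PySem.List.pyRange 1 (min m (min (n - i) (j + 1))) 1).map (fun t => pvIdx arr (i + t) (j - t)))
  let x2 := cums ((PySem.List.pyRange 1 (min m (min (i + 1) (j + 1))) 1).map (fun t => pvIdx arr (i - t) (j - t)))
  let x3 := cums ((PySem.List.pyRange 1 (min m (min (i + 1) (n - j))) 1).map (fun t => pvIdx arr (i - t) (j + t)))
  let l0 : Int := (r0.length : Int) - 1
  let l1 : Int := (r1.length : Int) - 1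
  let l2 : Int := (r2.length : Int) - 1
  let l3 : Int := (r3.length : Int) - 1
  let k0 : Int := (x0.length : Int) - 1
  let k1 : Int := (x1.length : Int) - 1
  let k2 : Int := (x2.length : Int) - 1
  let k3 : Int := (x3.length : Int) - 1
  let maxlen := max (max (max l0 l1) (max l2 l3)) (max (max k0 k1) (max k2 k3))
  let cap := min (m - 1) (max 1 maxlen)
  (PySem.List.pyRange 1 (cap + 1) 1).foldl (fun (bp : Int × Int) L =>
    let cand := c + PySem.List.pyGetD r0 (min L l0) 0 + PySem.List.pyGetD r1 (min L l1) 0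
      + PySem.List.pyGetD r2 (min L l2) 0 + PySem.List.pyGetD r3 (min L l3) 0
    let candx := c + PySem.List.pyGetD x0 (min L k0) 0 + PySem.List.pyGetD x1 (min L k1) 0
      + PySem.List.pyGetD x2 (min L k2) 0 + PySem.List.pyGetD x3 (min L k3) 0
    ((if cand > bp.1 then cand else bp.1), (if candx > bp.2 then candx else bp.2))) bp

def pang_alt (n : Int) (m : Int) (arr : List (List Int)) : Int :=
  let r := (PySem.List.pyRange 0 n 1).foldl (fun bp i =>
    (PySem.List.pyRange 0 n 1).foldl (fun bp j => bCell n m arr i j bp) bp)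
    ((-9999999999 : Int), (-99999999999 : Int))
  if r.1 > r.2 then r.1 else r.2

-- ===== PRECONDITION & SPEC =====
-- Pre_pang excludes exactly the inputs where A raises IndexError: fewer than n
-- rows, or one of the first n rows shorter than n.
def Pre_pang (n : Int) (m : Int) (arr : List (List Int)) : Prop :=
  n ≤ (arr.length : Int) ∧ ∀ row ∈ arr.take n.toNat, n ≤ (row.length : Int)
instance (n : Int) (m : Int) (arr : List (List Int)) : Decidable (Pre_pang n m arr) := by
  unfold Pre_pang; infer_instance

def pvWitness_pang : Int × Int × List (List Int) := (2, 2, [[1, 2], [3, 4]])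

def Spec_pang (n : Int) (m : Int) (arr : List (List Int)) (out : Int) : Prop := out = pang_alt n m arr
instance (n : Int) (m : Int) (arr : List (List Int)) (out : Int) : Decidable (Spec_pang n m arr out) := by unfold Spec_pang; infer_instance

-- ===== CLAIM (what is proved, stated in full; the proofs are below) =====
def Claim_equal_pang : Prop := ∀ (n : Int) (m : Int) (arr : List (List Int)), Dom_pang n m arr → Pre_pang n m arr → Spec_pang n m arr (pang n m arr)

-- ===== LEMMAS AND PROOFS =====

-- one clipped arm as a list, and the sum of its first L values
def rayL (e : Int) (f : Int → Int) : List Int := (PySem.List.pyRange 1 e 1).map f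
def armSum (e : Int) (f : Int → Int) (L : Int) : Int := ((rayL e f).take L.toNat).sum

-- the plus candidate of cell (i,j) at arm length L
def candP (n m : Int) (arr : List (List Int)) (i j L : Int) : Int :=
  pvIdx arr i j
    + armSum (min m (n - j)) (fun t => pvIdx arr i (j + t)) L
    + armSum (min m (n - i)) (fun t => pvIdx arr (i + t) j) L
    + armSum (min m (j + 1)) (fun t => pvIdx arr i (j - t)) L
    + armSum (min m (i + 1)) (fun t => pvIdx arr (i - t) j) L

-- the X candidate of cell (i,j) at arm length L
def candX (n m : Int) (arr : List (List Int)) (i j L : Int) : Int :=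
  pvIdx arr i j
    + armSum (min m (min (n - i) (n - j))) (fun t => pvIdx arr (i + t) (j + t)) L
    + armSum (min m (min (n - i) (j + 1))) (fun t => pvIdx arr (i + t) (j - t)) L
    + armSum (min m (min (i + 1) (j + 1))) (fun t => pvIdx arr (i - t) (j - t)) L
    + armSum (min m (min (i + 1) (n - j))) (fun t => pvIdx arr (i - t) (j + t)) L

lemma cums_aux (r : List Int) : ∀ (out : List Int) (s : Int),
    (r.foldl (fun (st : List Int × Int) v => (st.1 ++ [st.2 + v], st.2 + v)) (out, s)).1
    = out ++ (List.range r.length).map (fun k => s + ((r.take (k + 1)).sum)) := by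
  induction r with
  | nil => intro out s; simp
  | cons v rest ih =>
    intro out s
    simp only [List.foldl_cons]
    rw [ih]
    rw [List.length_cons, List.range_succ_eq_map]
    simp [List.map_map, Function.comp_def, List.take_succ_cons, add_assoc]

lemma cums_eq (r : List Int) :
    cums r = (List.range (r.length + 1)).map (fun k => (r.take k).sum) := by
  unfold cums
  rw [cums_aux]
  rw [List.range_succ_eq_map]
  simp [List.map_map, Function.comp_def]

lemma cums_length (r : List Int) : ((cums r).length : Int) - 1 = (r.length : Int) := by
  rw [cums_eq]; simp

lemma look_cums (r : List Int) (L : Int) (hL : 0 ≤ L) :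
    PySem.List.pyGetD (cums r) (min L (r.length : Int)) 0 = (r.take L.toNat).sum := by
  have hlen : ((cums r).length : Int) = (r.length : Int) + 1 := by
    have := cums_length r; omega
  have h0 : 0 ≤ min L (r.length : Int) := by positivity
  have h1 : min L (r.length : Int) < ((cums r).length : Int) := by omega
  rw [PySem.List.pyGetD_eq_getElem _ _ h0 h1]
  simp only [cums_eq, List.getElem_map, List.getElem_range]
  by_cases hc : L ≤ (r.length : Int)
  · rw [min_eq_left hc]
  · rw [min_eq_right (not_le.mp hc).le]
    rw [Int.toNat_natCast, List.take_length]
    rw [List.take_of_length_le (by omega)]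


lemma look_ray (e : Int) (f : Int → Int) (L : Int) (hL : 0 ≤ L) :
    PySem.List.pyGetD (cums ((PySem.List.pyRange 1 e 1).map f)) (min L (((e - 1).toNat : Int))) 0
    = armSum e f L := by
  have h := look_cums ((PySem.List.pyRange 1 e 1).map f) L hL
  rw [List.length_map, PySem.List.length_pyRange_one] at h
  exact h

lemma rayL_length (e : Int) (f : Int → Int) : (rayL e f).length = (e - 1).toNat := by
  simp [rayL, PySem.List.length_pyRange_one]

lemma armSum_succ (e : Int) (f : Int → Int) (s : Int) (hs : 1 ≤ s) :
    armSum e f s = armSum e f (s - 1) + (if s < e then f s else 0) := by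
  have hlen := rayL_length e f
  by_cases hc : s < e
  · have hk : (s - 1).toNat < (rayL e f).length := by omega
    have hsucc : s.toNat = (s - 1).toNat + 1 := by omega
    unfold armSum
    rw [hsucc, List.sum_take_succ _ _ hk]
    rw [if_pos hc]
    congr 1
    unfold rayL
    rw [List.getElem_map, PySem.List.getElem_pyRange_one]
    congr 1
    omega
  · have hge : (rayL e f).length ≤ (s - 1).toNat := by omega
    have hge' : (rayL e f).length ≤ s.toNat := by omega
    unfold armSum
    rw [List.take_of_length_le hge, List.take_of_length_le hge', if_neg hc]
    ring

lemma armSum_const (e : Int) (f : Int → Int) (L1 L2 : Int)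
    (h1 : ((rayL e f).length : Int) ≤ L1) (h2 : ((rayL e f).length : Int) ≤ L2) :
    armSum e f L1 = armSum e f L2 := by
  unfold armSum
  rw [List.take_of_length_le (by omega), List.take_of_length_le (by omega)]

lemma foldl_max_of_le (f : Int → Int) : ∀ (l : List Int) (acc : Int),
    (∀ s ∈ l, f s ≤ acc) → l.foldl (fun a s => max a (f s)) acc = acc := by
  intro l
  induction l with
  | nil => intro acc _; rfl
  | cons x t ih =>
    intro acc h
    simp only [List.foldl_cons]
    rw [max_eq_left (h x (by simp))]
    exact ih acc (fun s hs => h s (by simp [hs]))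

lemma pairfold_max (m : Int) (upd : Int → Int → Int) (cand : Int → Int)
    (hupd : ∀ s x, 1 ≤ s → s < m → x = cand (s - 1) → upd x s = cand s) :
    ∀ (k : Nat) (a : Int), (m - a).toNat ≤ k → 1 ≤ a → ∀ (x mx : Int), x = cand (a - 1) →
    ((PySem.List.pyRange a m 1).foldl
        (fun (st : Int × Int) s => (upd st.1 s, if upd st.1 s > st.2 then upd st.1 s else st.2))
        (x, mx)).2
    = (PySem.List.pyRange a m 1).foldl (fun mv s => if cand s > mv then cand s else mv) mx := by
  intro k
  induction k with
  | zero =>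
    intro a hk ha x mx hx
    rw [PySem.List.pyRange_one_eq_nil (by omega)]
    rfl
  | succ k ih =>
    intro a hk ha x mx hx
    by_cases hlt : a < m
    · rw [PySem.List.pyRange_one_cons hlt]
      simp only [List.foldl_cons]
      rw [hupd a x ha hlt hx]
      exact ih (a + 1) (by omega) (by omega) _ _ (by norm_num)
    · rw [PySem.List.pyRange_one_eq_nil (by omega)]
      rfl

lemma foldMax_cap (m cap : Int) (cand : Int → Int) (mx : Int)
    (h1 : 1 ≤ cap) (h2 : cap ≤ m - 1)
    (hconst : ∀ s, cap ≤ s → s ≤ m - 1 → cand s = cand cap) :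
    (PySem.List.pyRange 1 m 1).foldl (fun mv s => if cand s > mv then cand s else mv) mx
    = (PySem.List.pyRange 1 (cap + 1) 1).foldl (fun mv s => if cand s > mv then cand s else mv) mx := by
  have hstep : (fun (mv s : Int) => if cand s > mv then cand s else mv)
      = (fun mv s => max mv (cand s)) := by
    funext mv s; split <;> omega
  rw [hstep]
  rw [PySem.List.pyRange_one_append 1 (cap + 1) m (by omega) (by omega), List.foldl_append]
  have hcap_mem : cap ∈ PySem.List.pyRange 1 (cap + 1) 1 :=
    PySem.List.mem_pyRange_one.2 ⟨h1, by omega⟩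
  apply foldl_max_of_le
  intro s hs
  have hmem := PySem.List.mem_pyRange_one.1 hs
  rw [hconst s (by omega) (by omega)]
  exact (PySem.List.le_foldl_max_int _ cand mx).2 cap hcap_mem

lemma updP (n m : Int) (arr : List (List Int)) (i j : Int)
    (hi : 0 ≤ i) (hi' : i < n) (hj : 0 ≤ j) (hj' : j < n) :
    ∀ s x, 1 ≤ s → s < m → x = candP n m arr i j (s - 1) →
    (([((0:Int),(1:Int)),(1,0),(0,-1),(-1,0)] : List (Int × Int)).foldl (fun sv d =>
      let ni := i + d.1 * s
      let nj := j + d.2 * s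
      if 0 ≤ ni ∧ ni < n ∧ 0 ≤ nj ∧ nj < n then sv + pvIdx arr ni nj else sv) x)
    = candP n m arr i j s := by
  intro s x hs hsm hx
  subst hx
  unfold candP
  rw [armSum_succ _ _ s hs, armSum_succ _ _ s hs, armSum_succ _ _ s hs, armSum_succ _ _ s hs]
  simp only [List.foldl_cons, List.foldl_nil, zero_mul, one_mul, neg_one_mul, add_zero,
    ← sub_eq_add_neg]
  have h1 : ((0:Int) ≤ i ∧ i < n ∧ 0 ≤ j + s ∧ j + s < n) ↔ s < min m (n - j) := by omega
  have h2 : ((0:Int) ≤ i + s ∧ i + s < n ∧ 0 ≤ j ∧ j < n) ↔ s < min m (n - i) := by omega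
  have h3 : ((0:Int) ≤ i ∧ i < n ∧ 0 ≤ j - s ∧ j - s < n) ↔ s < min m (j + 1) := by omega
  have h4 : ((0:Int) ≤ i - s ∧ i - s < n ∧ 0 ≤ j ∧ j < n) ↔ s < min m (i + 1) := by omega
  simp only [h1, h2, h3, h4]
  split_ifs <;> ring

lemma updX (n m : Int) (arr : List (List Int)) (i j : Int)
    (hi : 0 ≤ i) (hi' : i < n) (hj : 0 ≤ j) (hj' : j < n) :
    ∀ s x, 1 ≤ s → s < m → x = candX n m arr i j (s - 1) →
    (([((1:Int),(1:Int)),(1,-1),(-1,-1),(-1,1)] : List (Int × Int)).foldl (fun sv d =>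
      let ni := i + d.1 * s
      let nj := j + d.2 * s
      if 0 ≤ ni ∧ ni < n ∧ 0 ≤ nj ∧ nj < n then sv + pvIdx arr ni nj else sv) x)
    = candX n m arr i j s := by
  intro s x hs hsm hx
  subst hx
  unfold candX
  rw [armSum_succ _ _ s hs, armSum_succ _ _ s hs, armSum_succ _ _ s hs, armSum_succ _ _ s hs]
  simp only [List.foldl_cons, List.foldl_nil, one_mul, neg_one_mul,
    ← sub_eq_add_neg]
  have h1 : ((0:Int) ≤ i + s ∧ i + s < n ∧ 0 ≤ j + s ∧ j + s < n) ↔ s < min m (min (n - i) (n - j)) := by omega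
  have h2 : ((0:Int) ≤ i + s ∧ i + s < n ∧ 0 ≤ j - s ∧ j - s < n) ↔ s < min m (min (n - i) (j + 1)) := by omega
  have h3 : ((0:Int) ≤ i - s ∧ i - s < n ∧ 0 ≤ j - s ∧ j - s < n) ↔ s < min m (min (i + 1) (j + 1)) := by omega
  have h4 : ((0:Int) ≤ i - s ∧ i - s < n ∧ 0 ≤ j + s ∧ j + s < n) ↔ s < min m (min (i + 1) (n - j)) := by omega
  simp only [h1, h2, h3, h4]
  split_ifs <;> ring

lemma cand_zero_P (n m : Int) (arr : List (List Int)) (i j : Int) :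
    pvIdx arr i j = candP n m arr i j (1 - 1) := by
  unfold candP armSum
  norm_num

lemma cand_zero_X (n m : Int) (arr : List (List Int)) (i j : Int) :
    pvIdx arr i j = candX n m arr i j (1 - 1) := by
  unfold candX armSum
  norm_num

lemma cellP_eq (n m : Int) (arr : List (List Int)) (i j mx : Int)
    (hi : 0 ≤ i) (hi' : i < n) (hj : 0 ≤ j) (hj' : j < n) :
    pangPassCell n m arr [(0,1),(1,0),(0,-1),(-1,0)] i j mx
    = (PySem.List.pyRange 1 m 1).foldl
        (fun mv s => if candP n m arr i j s > mv then candP n m arr i j s else mv) mx := by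
  exact pairfold_max m _ (candP n m arr i j) (updP n m arr i j hi hi' hj hj')
    (m - 1).toNat 1 (by omega) (by omega) _ mx (cand_zero_P n m arr i j)

lemma cellX_eq (n m : Int) (arr : List (List Int)) (i j mx : Int)
    (hi : 0 ≤ i) (hi' : i < n) (hj : 0 ≤ j) (hj' : j < n) :
    pangPassCell n m arr [(1,1),(1,-1),(-1,-1),(-1,1)] i j mx
    = (PySem.List.pyRange 1 m 1).foldl
        (fun mv s => if candX n m arr i j s > mv then candX n m arr i j s else mv) mx := by
  exact pairfold_max m _ (candX n m arr i j) (updX n m arr i j hi hi' hj hj')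
    (m - 1).toNat 1 (by omega) (by omega) _ mx (cand_zero_X n m arr i j)

set_option maxHeartbeats 1000000 in
lemma bCell_eq (n m : Int) (arr : List (List Int)) (i j : Int) (bp : Int × Int)
    (hi : 0 ≤ i) (hi' : i < n) (hj : 0 ≤ j) (hj' : j < n) :
    bCell n m arr i j bp
    = (pangPassCell n m arr [(0,1),(1,0),(0,-1),(-1,0)] i j bp.1,
       pangPassCell n m arr [(1,1),(1,-1),(-1,-1),(-1,1)] i j bp.2) := by
  obtain ⟨b1, b2⟩ := bp
  rw [cellP_eq n m arr i j b1 hi hi' hj hj', cellX_eq n m arr i j b2 hi hi' hj hj']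
  by_cases hm : m ≤ 1
  · rw [PySem.List.pyRange_one_eq_nil hm]
    simp only [List.foldl_nil]
    simp only [bCell, cums_length, List.length_map, PySem.List.length_pyRange_one]
    have hnil : ∀ (X : Int), min (m - 1) (max 1 X) + 1 ≤ 1 := fun X => by omega
    rw [PySem.List.pyRange_one_eq_nil (hnil _)]
    rfl
  · rw [not_le] at hm
    simp only [bCell, cums_length, List.length_map, PySem.List.length_pyRange_one]
    set M : Int := max (max (max (((min m (n - j) - 1).toNat : Int)) (((min m (n - i) - 1).toNat : Int))) (max (((min m (j + 1) - 1).toNat : Int)) (((min m (i + 1) - 1).toNat : Int)))) (max (max (((min m (min (n - i) (n - j)) - 1).toNat : Int)) (((min m (min (n - i) (j + 1)) - 1).toNat : Int))) (max (((min m (min (i + 1) (j + 1)) - 1).toNat : Int)) (((min m (min (i + 1) (n - j)) - 1).toNat : Int)))) with hM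
    have hcP : ∀ s, min (m - 1) (max 1 M) ≤ s → s ≤ m - 1 →
        candP n m arr i j s = candP n m arr i j (min (m - 1) (max 1 M)) := by
      intro s hs1 hs2
      rcases le_total (m - 1) (max 1 M) with h | h
      · have hse : s = min (m - 1) (max 1 M) := by omega
        rw [hse]
      · have hcap2 : M ≤ min (m - 1) (max 1 M) := by
          rw [min_eq_right h]; exact le_max_right _ _
        have c1 : ((rayL (min m (n - j)) (fun t => pvIdx arr i (j + t))).length : Int) ≤ M := by
          rw [rayL_length, hM]; exact (le_max_left _ _).trans ((le_max_left _ _).trans (le_max_left _ _))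
        have c2 : ((rayL (min m (n - i)) (fun t => pvIdx arr (i + t) j)).length : Int) ≤ M := by
          rw [rayL_length, hM]; exact (le_max_right _ _).trans ((le_max_left _ _).trans (le_max_left _ _))
        have c3 : ((rayL (min m (j + 1)) (fun t => pvIdx arr i (j - t))).length : Int) ≤ M := by
          rw [rayL_length, hM]; exact (le_max_left _ _).trans ((le_max_right _ _).trans (le_max_left _ _))
        have c4 : ((rayL (min m (i + 1)) (fun t => pvIdx arr (i - t) j)).length : Int) ≤ M := by
          rw [rayL_length, hM]; exact (le_max_right _ _).trans ((le_max_right _ _).trans (le_max_left _ _))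
        unfold candP
        rw [armSum_const _ _ s _ (le_trans c1 (le_trans hcap2 hs1)) (le_trans c1 hcap2),
            armSum_const _ _ s _ (le_trans c2 (le_trans hcap2 hs1)) (le_trans c2 hcap2),
            armSum_const _ _ s _ (le_trans c3 (le_trans hcap2 hs1)) (le_trans c3 hcap2),
            armSum_const _ _ s _ (le_trans c4 (le_trans hcap2 hs1)) (le_trans c4 hcap2)]
    have hcX : ∀ s, min (m - 1) (max 1 M) ≤ s → s ≤ m - 1 →
        candX n m arr i j s = candX n m arr i j (min (m - 1) (max 1 M)) := by
      intro s hs1 hs2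
      rcases le_total (m - 1) (max 1 M) with h | h
      · have hse : s = min (m - 1) (max 1 M) := by omega
        rw [hse]
      · have hcap2 : M ≤ min (m - 1) (max 1 M) := by
          rw [min_eq_right h]; exact le_max_right _ _
        have c1 : ((rayL (min m (min (n - i) (n - j))) (fun t => pvIdx arr (i + t) (j + t))).length : Int) ≤ M := by
          rw [rayL_length, hM]; exact (le_max_left _ _).trans ((le_max_left _ _).trans (le_max_right _ _))
        have c2 : ((rayL (min m (min (n - i) (j + 1))) (fun t => pvIdx arr (i + t) (j - t))).length : Int) ≤ M := by
          rw [rayL_length, hM]; exact (le_max_right _ _).trans ((le_max_left _ _).trans (le_max_right _ _))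
        have c3 : ((rayL (min m (min (i + 1) (j + 1))) (fun t => pvIdx arr (i - t) (j - t))).length : Int) ≤ M := by
          rw [rayL_length, hM]; exact (le_max_left _ _).trans ((le_max_right _ _).trans (le_max_right _ _))
        have c4 : ((rayL (min m (min (i + 1) (n - j))) (fun t => pvIdx arr (i - t) (j + t))).length : Int) ≤ M := by
          rw [rayL_length, hM]; exact (le_max_right _ _).trans ((le_max_right _ _).trans (le_max_right _ _))
        unfold candX
        rw [armSum_const _ _ s _ (le_trans c1 (le_trans hcap2 hs1)) (le_trans c1 hcap2),
            armSum_const _ _ s _ (le_trans c2 (le_trans hcap2 hs1)) (le_trans c2 hcap2),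
            armSum_const _ _ s _ (le_trans c3 (le_trans hcap2 hs1)) (le_trans c3 hcap2),
            armSum_const _ _ s _ (le_trans c4 (le_trans hcap2 hs1)) (le_trans c4 hcap2)]
    rw [foldMax_cap m (min (m - 1) (max 1 M)) (candP n m arr i j) b1 (by omega) (by omega) hcP,
        foldMax_cap m (min (m - 1) (max 1 M)) (candX n m arr i j) b2 (by omega) (by omega) hcX]
    refine Eq.trans (PySem.List.foldl_congr_mem _ _
      (fun (bp : Int × Int) L =>
        ((if candP n m arr i j L > bp.1 then candP n m arr i j L else bp.1),
         (if candX n m arr i j L > bp.2 then candX n m arr i j L else bp.2))) _ ?_)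
      (PySem.List.foldl_prod_mk
        (fun (a : Int) (L : Int) => if candP n m arr i j L > a then candP n m arr i j L else a)
        (fun (b : Int) (L : Int) => if candX n m arr i j L > b then candX n m arr i j L else b)
        (PySem.List.pyRange 1 (min (m - 1) (max 1 M) + 1) 1) b1 b2)
    intro bp L hL
    have hLb := PySem.List.mem_pyRange_one.1 hL
    rw [look_ray _ _ L (by omega), look_ray _ _ L (by omega),
        look_ray _ _ L (by omega), look_ray _ _ L (by omega),
        look_ray _ _ L (by omega), look_ray _ _ L (by omega),
        look_ray _ _ L (by omega), look_ray _ _ L (by omega)]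
    simp only [candP, candX]

lemma inner_split (n m : Int) (arr : List (List Int)) (i : Int) (hib : 0 ≤ i ∧ i < n) :
    ∀ (acc : Int × Int),
    (PySem.List.pyRange 0 n 1).foldl (fun bp j => bCell n m arr i j bp) acc
    = ((PySem.List.pyRange 0 n 1).foldl
         (fun mv j => pangPassCell n m arr [(0,1),(1,0),(0,-1),(-1,0)] i j mv) acc.1,
       (PySem.List.pyRange 0 n 1).foldl
         (fun mv j => pangPassCell n m arr [(1,1),(1,-1),(-1,-1),(-1,1)] i j mv) acc.2) := by
  intro acc
  obtain ⟨a1, a2⟩ := acc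
  refine (PySem.List.foldl_congr_mem _ _
    (fun (bp : Int × Int) j =>
      (pangPassCell n m arr [(0,1),(1,0),(0,-1),(-1,0)] i j bp.1,
       pangPassCell n m arr [(1,1),(1,-1),(-1,-1),(-1,1)] i j bp.2)) _ ?_).trans
    (PySem.List.foldl_prod_mk
      (fun (a : Int) (j : Int) => pangPassCell n m arr [(0,1),(1,0),(0,-1),(-1,0)] i j a)
      (fun (b : Int) (j : Int) => pangPassCell n m arr [(1,1),(1,-1),(-1,-1),(-1,1)] i j b)
      (PySem.List.pyRange 0 n 1) a1 a2)
  intro bp j hjm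
  have hjb := PySem.List.mem_pyRange_one.1 hjm
  exact bCell_eq n m arr i j bp (by omega) (by omega) (by omega) (by omega)

lemma alt_fold_eq (n m : Int) (arr : List (List Int)) :
    (PySem.List.pyRange 0 n 1).foldl (fun bp i =>
      (PySem.List.pyRange 0 n 1).foldl (fun bp j => bCell n m arr i j bp) bp)
      ((-9999999999 : Int), (-99999999999 : Int))
    = (pangPass n m arr [(0,1),(1,0),(0,-1),(-1,0)] (-9999999999),
       pangPass n m arr [(1,1),(1,-1),(-1,-1),(-1,1)] (-99999999999)) := by
  refine (PySem.List.foldl_congr_mem _ _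
    (fun (bp : Int × Int) i =>
      ((PySem.List.pyRange 0 n 1).foldl
         (fun mv j => pangPassCell n m arr [(0,1),(1,0),(0,-1),(-1,0)] i j mv) bp.1,
       (PySem.List.pyRange 0 n 1).foldl
         (fun mv j => pangPassCell n m arr [(1,1),(1,-1),(-1,-1),(-1,1)] i j mv) bp.2)) _ ?_).trans
    (PySem.List.foldl_prod_mk
      (fun (a : Int) (i : Int) => (PySem.List.pyRange 0 n 1).foldl
        (fun mv j => pangPassCell n m arr [(0,1),(1,0),(0,-1),(-1,0)] i j mv) a)
      (fun (b : Int) (i : Int) => (PySem.List.pyRange 0 n 1).foldl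
        (fun mv j => pangPassCell n m arr [(1,1),(1,-1),(-1,-1),(-1,1)] i j mv) b)
      (PySem.List.pyRange 0 n 1) (-9999999999) (-99999999999))
  intro acc i him
  exact inner_split n m arr i (PySem.List.mem_pyRange_one.1 him) acc

-- ===== VERDICT (by name: the statement is the Claim_ definition above) =====
theorem pang_spec : Claim_equal_pang := by
  unfold Claim_equal_pang
  intro n m arr _hdom _hpre
  unfold Spec_pang pang pang_alt
  rw [alt_fold_eq]
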